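-- pv_equiv track=rewrite | github.com/domgalati/mortician | mortician/bundle.py | parse_index_md
-- ===== SOURCE A (Python) =====
-- from typing import Any, Dict, List, Optional, Tuple
--
-- H_SUMMARY = "Summary"
--
-- H_IMPACT = "Impact & Severity"
--
-- H_ROOT = "Root Cause"
--
-- H_RESOLUTION = "Resolution"
--
-- SUB_TEMP = "Temporary"
--
-- SUB_PERM = "Permanent"
--
-- def _parse_h3_subsection(body: str, subtitle: str) -> str:
--     """Extract ### subtitle body until next ### heading or EOF."""
--     if not body.strip():
--         return ""
--     lines = body.splitlines()
--     target = f"### {subtitle}"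
--     start = None
--     for i, line in enumerate(lines):
--         if line.strip() == target:
--             start = i + 1
--             break
--     if start is None:
--         return ""
--     out: List[str] = []
--     for line in lines[start:]:
--         if line.startswith("### "):
--             break
--         out.append(line)
--     return "\n".join(out).strip()
--
-- def parse_index_md(text: str) -> Dict[str, str]:
--     """Split index.md into summary, impact, root cause, resolution temp/perm bodies."""
--     lines = text.splitlines()
--     section_order = [H_SUMMARY, H_IMPACT, H_ROOT, H_RESOLUTION]
--     headings = {s: None for s in section_order}
--     for i, line in enumerate(lines):
--         if line.startswith("## ") and not line.startswith("###"):
--             title = line[3:].strip()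
--             if title in headings:
--                 headings[title] = i
--
--     def slice_body(start_line: Optional[int], end_line: Optional[int]) -> str:
--         if start_line is None:
--             return ""
--         a = start_line + 1
--         b = end_line if end_line is not None else len(lines)
--         chunk = lines[a:b]
--         return "\n".join(chunk).strip()
--
--     def next_h2(after: Optional[int]) -> Optional[int]:
--         if after is None:
--             return None
--         for j in range(after + 1, len(lines)):
--             if lines[j].startswith("## ") and not lines[j].startswith("###"):
--                 return j
--         return None
--
--     hs, hi, hr, hres = headings[H_SUMMARY], headings[H_IMPACT], headings[H_ROOT], headings[H_RESOLUTION]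
--     summary = slice_body(hs, next_h2(hs))
--     impact = slice_body(hi, next_h2(hi))
--     root_cause = slice_body(hr, next_h2(hr))
--
--     res_start = hres
--     res_body = slice_body(res_start, next_h2(res_start))
--     temp_fix, perm_fix = _parse_resolution_subsections(res_body)
--
--     return {
--         "incident_summary": summary,
--         "impact_markdown": impact,
--         "root_cause": root_cause,
--         "resolution_temporary": temp_fix,
--         "resolution_permanent": perm_fix,
--     }
--
-- def _parse_resolution_subsection(resolution_body: str, sub: str) -> str:
--     return _parse_h3_subsection(resolution_body, sub)
--
-- def _parse_resolution_subsections(resolution_body: str) -> Tuple[str, str]: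
--     # Determine whether the headings exist; we only apply the legacy
--     # fallback when *neither* "### Temporary" nor "### Permanent" is present.
--     lines = resolution_body.splitlines()
--     has_temp = any(line.strip() == f"### {SUB_TEMP}" for line in lines)
--     has_perm = any(line.strip() == f"### {SUB_PERM}" for line in lines)
--
--     t = _parse_resolution_subsection(resolution_body, SUB_TEMP)
--     p = _parse_resolution_subsection(resolution_body, SUB_PERM)
--
--     if not has_temp and not has_perm and resolution_body.strip():
--         # No ### subsections at all: treat whole block as temporary (legacy).
--         return resolution_body.strip(), ""
--
--     # Headings exist (even if their bodies are empty): keep them empty.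
--     return t, p
-- ===== SOURCE B (Python) =====
-- def _grab(lines, target):
--     """First section headed by `target` (matched after strip), collected until a
--     line starting with '### '; None when the heading never occurs."""
--     out = None
--     collecting = False
--     for line in lines:
--         if collecting:
--             if line.startswith("### "):
--                 collecting = False
--             else:
--                 out.append(line)
--         elif out is None and line.strip() == target:
--             out = []
--             collecting = True
--     return None if out is None else "\n".join(out).strip()
--
--
-- def _split_resolution(body):
--     lines = body.splitlines()
--     temp = _grab(lines, "### Temporary")
--     perm = _grab(lines, "### Permanent")
--     if temp is None and perm is None:
--         b = body.strip()
--         return (b, "") if b else ("", "")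
--     return (temp or "", perm or "")
--
--
-- def parse_index_md(text):
--     """One linear scan: accumulate lines into the current top-level section."""
--     bufs = {"Summary": [], "Impact & Severity": [], "Root Cause": [], "Resolution": []}
--     cur = None
--     for line in text.splitlines():
--         if line.startswith("## "):
--             title = line[3:].strip()
--             if title in bufs:
--                 bufs[title] = []
--                 cur = title
--             else:
--                 cur = None
--         elif cur is not None:
--             bufs[cur].append(line)
--
--     def body(k):
--         return "\n".join(bufs[k]).strip()
--
--     temp, perm = _split_resolution(body("Resolution"))
--     return {
--         "incident_summary": body("Summary"),
--         "impact_markdown": body("Impact & Severity"),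
--         "root_cause": body("Root Cause"),
--         "resolution_temporary": temp,
--         "resolution_permanent": perm,
--     }
-- ===== Notes on version B (the rewrite author's own statement) =====
-- stated objective: alternative
-- what changed: Replaces the locate-heading-indices/next_h2-rescan/slice decomposition by a single forward scan that accumulates lines into the current section's buffer (resetting a buffer on a repeated heading), and replaces the find-index-then-slice subsection extractor by a one-pass state machine.
import Mathlib
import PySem

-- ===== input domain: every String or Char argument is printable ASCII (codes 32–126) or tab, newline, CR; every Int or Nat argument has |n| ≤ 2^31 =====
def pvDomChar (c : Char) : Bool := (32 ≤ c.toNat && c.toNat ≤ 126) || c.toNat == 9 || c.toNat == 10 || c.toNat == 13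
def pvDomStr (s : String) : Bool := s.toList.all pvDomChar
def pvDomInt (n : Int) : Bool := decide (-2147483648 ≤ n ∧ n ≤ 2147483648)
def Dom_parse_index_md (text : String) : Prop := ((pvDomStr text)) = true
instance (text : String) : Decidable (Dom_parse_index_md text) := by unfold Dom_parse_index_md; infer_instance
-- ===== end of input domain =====

-- B replaces A's locate-heading-indices / next_h2-rescan / slice decomposition by one forward
-- accumulating scan (and a one-pass state machine for the ### subsections); objective: alternative.

-- ===== PORT A =====
-- helper _parse_h3_subsection (f"### {subtitle}" ported as PySem.Str.join "" [...])
def parse_h3_subsection (body : String) (subtitle : String) : String :=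
  if PySem.Str.strip body == "" then ""
  else
    let lines := PySem.Str.splitlines body
    let target := PySem.Str.join "" ["### ", subtitle]
    -- 'for i, line: if line.strip() == target: start = i+1; break' = find? over enumerate
    match (PySem.List.enumerate lines).find? (fun p => PySem.Str.strip p.2 == target) with
    | none => ""
    | some p =>
      -- 'for line in lines[start:]: if line.startswith("### "): break; out.append(line)' = takeWhile
      let out := (PySem.List.slice lines (some (p.1 + 1)) none).takeWhile
        (fun l => !PySem.Str.startswith l "### ")
      PySem.Str.strip (PySem.Str.join "\n" out)

def parse_resolution_subsections (resolution_body : String) : String × String :=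
  let lines := PySem.Str.splitlines resolution_body
  let has_temp := lines.any (fun l => PySem.Str.strip l == PySem.Str.join "" ["### ", "Temporary"])
  let has_perm := lines.any (fun l => PySem.Str.strip l == PySem.Str.join "" ["### ", "Permanent"])
  let t := parse_h3_subsection resolution_body "Temporary"
  let p := parse_h3_subsection resolution_body "Permanent"
  if !has_temp && !has_perm && !(PySem.Str.strip resolution_body == "") then
    (PySem.Str.strip resolution_body, "")
  else (t, p)

def headings0A : PySem.Dict String (Option Int) :=
  ["Summary", "Impact & Severity", "Root Cause", "Resolution"].foldl
    (fun d s => d.insert s none) PySem.Dict.empty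

def hStepA (h : PySem.Dict String (Option Int)) (p : Int × String) : PySem.Dict String (Option Int) :=
  if PySem.Str.startswith p.2 "## " && !PySem.Str.startswith p.2 "###" then
    let title := PySem.Str.strip (PySem.Str.slice p.2 (some 3) none)
    if h.contains title then h.insert title (some p.1) else h
  else h

def headingsA (lines : List String) : PySem.Dict String (Option Int) :=
  (PySem.List.enumerate lines).foldl hStepA headings0A

-- nested def next_h2: 'for j in range(after+1, len): if H2: return j' = find? over pyRange
-- (lines[j] is always in range there; ported with pyGetD '' which agrees in range)
def next_h2A (lines : List String) (after? : Option Int) : Option Int :=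
  match after? with
  | none => none
  | some a =>
    (PySem.List.pyRange (a + 1) (lines.length : Int)).find?
      (fun j => PySem.Str.startswith (PySem.List.pyGetD lines j "") "## " &&
               !PySem.Str.startswith (PySem.List.pyGetD lines j "") "###")

-- nested def slice_body
def slice_bodyA (lines : List String) (start? end? : Option Int) : String :=
  match start? with
  | none => ""
  | some s =>
    let a := s + 1
    let b := end?.getD (lines.length : Int)
    PySem.Str.strip (PySem.Str.join "\n" (PySem.List.slice lines (some a) (some b)))

def parse_index_md (text : String) : List (String × String) :=
  let lines := PySem.Str.splitlines text
  let headings := headingsA lines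
  let hs := headings.getD "Summary" none
  let hi := headings.getD "Impact & Severity" none
  let hr := headings.getD "Root Cause" none
  let hres := headings.getD "Resolution" none
  let summary := slice_bodyA lines hs (next_h2A lines hs)
  let impact := slice_bodyA lines hi (next_h2A lines hi)
  let root_cause := slice_bodyA lines hr (next_h2A lines hr)
  let res_body := slice_bodyA lines hres (next_h2A lines hres)
  let tp := parse_resolution_subsections res_body
  [("incident_summary", summary), ("impact_markdown", impact), ("root_cause", root_cause),
   ("resolution_temporary", tp.1), ("resolution_permanent", tp.2)]

-- ===== PORT B =====
def grabStep (target : String) (st : Option (List String) × Bool) (line : String) :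
    Option (List String) × Bool :=
  if st.2 then
    if PySem.Str.startswith line "### " then (st.1, false)
    else (st.1.map (· ++ [line]), true)
  else
    match st.1 with
    | none => if PySem.Str.strip line == target then (some [], true) else (none, false)
    | some out => (some out, false)

def grabB (lines : List String) (target : String) : Option String :=
  match lines.foldl (grabStep target) (none, false) with
  | (none, _) => none
  | (some out, _) => some (PySem.Str.strip (PySem.Str.join "\n" out))

def split_resolutionB (body : String) : String × String :=
  let lines := PySem.Str.splitlines body
  let temp := grabB lines "### Temporary"
  let perm := grabB lines "### Permanent"
  match temp, perm with
  | none, none =>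
    let b := PySem.Str.strip body
    if b == "" then ("", "") else (b, "")
  | t?, p? => (t?.getD "", p?.getD "")

def bufs0B : PySem.Dict String (List String) :=
  PySem.Dict.ofList
    [("Summary", []), ("Impact & Severity", []), ("Root Cause", []), ("Resolution", [])]

def sectionStep (st : PySem.Dict String (List String) × Option String) (line : String) :
    PySem.Dict String (List String) × Option String :=
  if PySem.Str.startswith line "## " then
    let title := PySem.Str.strip (PySem.Str.slice line (some 3) none)
    if st.1.contains title then (st.1.insert title [], some title) else (st.1, none)
  else
    match st.2 with
    | some c => (st.1.modify c [] (· ++ [line]), st.2)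
    | none => st

def bodyB (lines : List String) (k : String) : String :=
  PySem.Str.strip (PySem.Str.join "\n" ((lines.foldl sectionStep (bufs0B, none)).1.getD k []))

def parse_index_md_alt (text : String) : List (String × String) :=
  let lines := PySem.Str.splitlines text
  let tp := split_resolutionB (bodyB lines "Resolution")
  [("incident_summary", bodyB lines "Summary"),
   ("impact_markdown", bodyB lines "Impact & Severity"),
   ("root_cause", bodyB lines "Root Cause"),
   ("resolution_temporary", tp.1), ("resolution_permanent", tp.2)]

-- ===== PRECONDITION & SPEC =====
def Spec_parse_index_md (text : String) (out : List (String × String)) : Prop := out = parse_index_md_alt text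
instance (text : String) (out : List (String × String)) : Decidable (Spec_parse_index_md text out) := by unfold Spec_parse_index_md; infer_instance

-- ===== CLAIM (what is proved, stated in full; the proofs are below) =====
def Claim_equal_parse_index_md : Prop := ∀ (text : String), Dom_parse_index_md text → Spec_parse_index_md text (parse_index_md text)

-- ===== LEMMAS AND PROOFS =====

def isH2 (l : String) : Bool := PySem.Str.startswith l "## "
def titleOf (l : String) : String := PySem.Str.strip (PySem.Str.slice l (some 3) none)
def keys4 : List String := ["Summary", "Impact & Severity", "Root Cause", "Resolution"]
def isHead (k : String) (l : String) : Bool := isH2 l && (titleOf l == k)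

/-- Lines of the body of section `k`: the lines after the LAST `## k` heading up to the next
`## ` heading. -/
def bodyLines (k : String) : List String → Option (List String)
  | [] => none
  | l :: ls =>
    match bodyLines k ls with
    | some b => some b
    | none => if isHead k l then some (ls.takeWhile (fun x => !isH2 x)) else none

def lastIdx? (k : String) : List String → Option Nat
  | [] => none
  | l :: ls =>
    match lastIdx? k ls with
    | some j => some (j + 1)
    | none => if isHead k l then some 0 else none

lemma h2_not_h3 (l : String) (h : PySem.Str.startswith l "## " = true) :
    PySem.Str.startswith l "###" = false := by
  rw [PySem.Str.startswith_eq, PySem.Chars.startswith_iff] at h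
  rw [PySem.Str.startswith_eq]
  apply Bool.eq_false_iff.2
  rw [Ne, PySem.Chars.startswith_iff]
  intro h3
  obtain ⟨t, ht⟩ := h
  obtain ⟨u, hu⟩ := h3
  rw [← ht] at hu
  simp at hu

lemma isH2A_eq (l : String) :
    (PySem.Str.startswith l "## " && !PySem.Str.startswith l "###") = isH2 l := by
  unfold isH2
  cases h : PySem.Str.startswith l "## " with
  | false => simp
  | true => rw [h2_not_h3 l h]; rfl

lemma bodyLines_eq_lastIdx (k : String) (ls : List String) :
    bodyLines k ls = (lastIdx? k ls).map (fun i => (ls.drop (i + 1)).takeWhile (fun x => !isH2 x)) := by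
  induction ls with
  | nil => rfl
  | cons l ls ih =>
    rw [bodyLines, lastIdx?, ih]
    cases h : lastIdx? k ls with
    | some j => simp
    | none =>
      simp only [Option.map_none]
      by_cases hh : isHead k l = true
      · simp [hh]
      · simp [hh]

lemma contains_headings0 (x : String) : headings0A.contains x = true ↔ x ∈ keys4 := by
  simp [headings0A, keys4, PySem.Dict.contains_insert]
  tauto

lemma getD_headings0 (k : String) : headings0A.getD k none = none := by
  simp [headings0A, PySem.Dict.getD_insert]

lemma hStepA_eq (d : PySem.Dict String (Option Int)) (s : Int) (l : String) :
    hStepA d (s, l) =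
      if isH2 l then
        (if d.contains (titleOf l) then d.insert (titleOf l) (some s) else d)
      else d := by
  rw [hStepA]
  simp only [isH2A_eq, titleOf]

lemma hfold (k : String) (hk : k ∈ keys4) (ls : List String) :
    ∀ (s : Int) (d : PySem.Dict String (Option Int)),
      (∀ x, d.contains x = true ↔ x ∈ keys4) →
      ((PySem.List.enumerate ls s).foldl hStepA d).getD k none =
        (match lastIdx? k ls with
         | some j => some (s + (j : Int))
         | none => d.getD k none) := by
  induction ls with
  | nil => intro s d H; simp [PySem.List.enumerate_nil, lastIdx?]
  | cons l ls ih =>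
    intro s d H
    rw [PySem.List.enumerate_cons, List.foldl_cons]
    have H' : ∀ x, (hStepA d (s, l)).contains x = true ↔ x ∈ keys4 := by
      intro x
      rw [hStepA_eq]
      by_cases h2 : isH2 l = true
      · rw [if_pos h2]
        by_cases hc : d.contains (titleOf l) = true
        · rw [if_pos hc, PySem.Dict.contains_insert]
          constructor
          · intro hx
            rcases Bool.or_eq_true_iff.1 hx with hx | hx
            · exact (beq_iff_eq.1 hx) ▸ (H _).1 hc
            · exact (H _).1 hx
          · intro hx; exact Bool.or_eq_true_iff.2 (Or.inr ((H _).2 hx))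
        · rw [if_neg hc]; exact H x
      · rw [if_neg h2]; exact H x
    rw [ih (s + 1) (hStepA d (s, l)) H']
    cases hL : lastIdx? k ls with
    | some j =>
      simp only [lastIdx?, hL]
      congr 1
      push_cast
      ring
    | none =>
      simp only [lastIdx?, hL, hStepA_eq]
      by_cases h2 : isH2 l = true
      · rw [if_pos h2]
        by_cases hc : d.contains (titleOf l) = true
        · rw [if_pos hc, PySem.Dict.getD_insert]
          by_cases hkt : k = titleOf l
          · subst hkt
            have hh : isHead (titleOf l) l = true := by simp [isHead, h2]
            simp [hh]
          · have hh : isHead k l = false := by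
              simp [isHead, h2]
              exact fun h => absurd h.symm hkt
            simp [hh, hkt]
        · rw [if_neg hc]
          have hne : titleOf l ≠ k := by
            intro h
            exact hc ((H _).2 (h ▸ hk))
          have hh : isHead k l = false := by
            simp [isHead, h2]
            exact hne
          simp [hh]
      · rw [if_neg h2]
        have hh : isHead k l = false := by
          simp [isHead]
          intro h
          exact absurd h (Bool.not_eq_true _ ▸ h2)
        simp [hh]

lemma headingsA_getD (lines : List String) (k : String) (hk : k ∈ keys4) :
    (headingsA lines).getD k none = (lastIdx? k lines).map (fun i => Int.ofNat i) := by
  rw [headingsA, hfold k hk lines 0 headings0A contains_headings0]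
  cases lastIdx? k lines with
  | none => simp [getD_headings0]
  | some j => simp

lemma sliceScan (n : Nat) (xs : List String) (a : Nat) (hn : xs.length ≤ a + n) :
    PySem.List.slice xs (some (a : Int))
      (some (((PySem.List.pyRange (a : Int) (xs.length : Int)).find?
          (fun j => PySem.Str.startswith (PySem.List.pyGetD xs j "") "## " &&
                   !PySem.Str.startswith (PySem.List.pyGetD xs j "") "###")).getD (xs.length : Int))) =
      (xs.drop a).takeWhile (fun l => !isH2 l) := by
  induction n generalizing a with
  | zero =>
    have hla : xs.length ≤ a := by omega
    rw [PySem.List.pyRange_one_eq_nil (by exact_mod_cast hla)]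
    simp only [List.find?_nil, Option.getD_none]
    rw [PySem.List.slice_toNat xs (by exact_mod_cast Nat.zero_le _) (by exact_mod_cast Nat.zero_le _)]
    simp [Nat.sub_eq_zero_of_le hla, List.drop_eq_nil_of_le hla]
  | succ n ih =>
    by_cases hla : xs.length ≤ a
    · rw [PySem.List.pyRange_one_eq_nil (by exact_mod_cast hla)]
      simp only [List.find?_nil, Option.getD_none]
      rw [PySem.List.slice_toNat xs (by exact_mod_cast Nat.zero_le _) (by exact_mod_cast Nat.zero_le _)]
      simp [Nat.sub_eq_zero_of_le hla, List.drop_eq_nil_of_le hla]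
    · have ha : a < xs.length := by omega
      rw [PySem.List.pyRange_one_cons (by exact_mod_cast ha), List.find?_cons]
      have hget : PySem.List.pyGetD xs ((a : Nat) : Int) "" = xs[a] := by
        rw [PySem.List.pyGetD_natCast]
        exact List.getD_eq_getElem xs "" ha
      rw [hget, isH2A_eq]
      cases hH : isH2 xs[a] with
      | true =>
        simp only [Option.getD_some]
        rw [PySem.List.slice_toNat xs (by exact_mod_cast Nat.zero_le _) (by exact_mod_cast Nat.zero_le _)]
        rw [List.drop_eq_getElem_cons ha, List.takeWhile_cons]
        simp [hH]
      | false =>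
        simp only
        have hcast : ((a : Nat) : Int) + 1 = (((a + 1 : Nat)) : Int) := by push_cast; ring
        rw [hcast]
        have ih' := ih (a + 1) (by omega)
        set b : Int := ((PySem.List.pyRange (((a + 1 : Nat)) : Int) (xs.length : Int)).find?
          (fun j => PySem.Str.startswith (PySem.List.pyGetD xs j "") "## " &&
            !PySem.Str.startswith (PySem.List.pyGetD xs j "") "###")).getD (xs.length : Int) with hbdef
        have hb : ((a + 1 : Nat) : Int) ≤ b := by
          rw [hbdef]
          cases hf : (PySem.List.pyRange (((a + 1 : Nat)) : Int) (xs.length : Int)).find?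
            (fun j => PySem.Str.startswith (PySem.List.pyGetD xs j "") "## " &&
              !PySem.Str.startswith (PySem.List.pyGetD xs j "") "###") with
          | none => simp; exact_mod_cast Nat.succ_le_of_lt ha
          | some j =>
            have hj := PySem.List.mem_pyRange_one.1 (List.mem_of_find?_eq_some hf)
            simpa using hj.1
        have hb0 : (0 : Int) ≤ b := le_trans (by exact_mod_cast Nat.zero_le _) hb
        rw [PySem.List.slice_toNat xs (by exact_mod_cast Nat.zero_le _) hb0] at ih' ⊢
        have hbn : a + 1 ≤ b.toNat := by omega
        have hcount : b.toNat - a = (b.toNat - (a + 1)) + 1 := by omega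
        simp only [Int.toNat_natCast] at ih' ⊢
        rw [hcount, List.drop_eq_getElem_cons ha, List.take_succ_cons]
        rw [ih', List.takeWhile_cons]
        simp [hH]

/-- A's per-section value equals the `bodyLines` characterisation. -/
lemma A_body (lines : List String) (k : String) (hk : k ∈ keys4) :
    slice_bodyA lines ((headingsA lines).getD k none)
        (next_h2A lines ((headingsA lines).getD k none)) =
      (match bodyLines k lines with
       | some b => PySem.Str.strip (PySem.Str.join "\n" b)
       | none => "") := by
  rw [headingsA_getD lines k hk, bodyLines_eq_lastIdx]
  cases hL : lastIdx? k lines with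
  | none => simp [slice_bodyA]
  | some i =>
    have hcast : ((i : Int) + 1) = (((i + 1 : Nat)) : Int) := by push_cast; ring
    have hcast : (Int.ofNat i + 1) = (((i + 1 : Nat)) : Int) := by
      simp [Int.ofNat_eq_natCast]
    simp only [Option.map_some, slice_bodyA, next_h2A]
    rw [hcast, sliceScan lines.length lines (i + 1) (by omega)]

lemma bufs0B_mk : bufs0B = PySem.Dict.mk
    [("Summary", []), ("Impact & Severity", []), ("Root Cause", []), ("Resolution", [])] := by
  decide

lemma contains_bufs0 (x : String) : bufs0B.contains x = true ↔ x ∈ keys4 := by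
  rw [PySem.Dict.contains_eq_isSome_get?, bufs0B_mk]
  simp [keys4, PySem.Dict.get?_mk_cons]
  constructor
  · intro h
    split_ifs at h with h1 h2 h3 h4 <;> tauto
  · intro h
    rcases h with h|h|h|h <;> subst h <;> simp

lemma getD_bufs0 (k : String) : bufs0B.getD k [] = [] := by
  rw [PySem.Dict.getD, bufs0B_mk]
  simp only [PySem.Dict.get?_mk_cons]
  split_ifs <;> rfl

lemma sectionStep_eq (bufs : PySem.Dict String (List String)) (cur : Option String) (l : String) :
    sectionStep (bufs, cur) l =
      if isH2 l then
        (if bufs.contains (titleOf l) then (bufs.insert (titleOf l) [], some (titleOf l))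
         else (bufs, none))
      else
        (match cur with
         | some c => (bufs.modify c [] (· ++ [l]), cur)
         | none => (bufs, cur)) := by
  rfl

set_option maxHeartbeats 2000000 in
lemma sfold (k : String) (hk : k ∈ keys4) (ls : List String) :
    ∀ (bufs : PySem.Dict String (List String)) (cur : Option String),
      (∀ x, bufs.contains x = true ↔ x ∈ keys4) →
      (∀ t, cur = some t → t ∈ keys4) →
      ((ls.foldl sectionStep (bufs, cur)).1.getD k []) =
        (match bodyLines k ls with
         | some b => b
         | none =>
           if cur = some k then bufs.getD k [] ++ ls.takeWhile (fun x => !isH2 x)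
           else bufs.getD k []) := by
  induction ls with
  | nil =>
    intro bufs cur H Hcur
    simp only [List.foldl_nil, bodyLines]
    split_ifs <;> simp
  | cons l ls ih =>
    intro bufs cur H Hcur
    rw [List.foldl_cons, sectionStep_eq]
    by_cases h2 : isH2 l = true
    · rw [if_pos h2]
      by_cases hc : bufs.contains (titleOf l) = true
      · rw [if_pos hc]
        have H' : ∀ x, (bufs.insert (titleOf l) []).contains x = true ↔ x ∈ keys4 := by
          intro x
          rw [PySem.Dict.contains_insert]
          constructor
          · intro hx
            rcases Bool.or_eq_true_iff.1 hx with hx | hx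
            · exact (beq_iff_eq.1 hx) ▸ (H _).1 hc
            · exact (H _).1 hx
          · intro hx; exact Bool.or_eq_true_iff.2 (Or.inr ((H _).2 hx))
        have Hc' : ∀ t, (some (titleOf l) : Option String) = some t → t ∈ keys4 := by
          intro t ht
          injection ht with h
          rw [← h]
          exact (H _).1 hc
        rw [ih _ _ H' Hc']
        rw [bodyLines]
        cases hB : bodyLines k ls with
        | some b => simp
        | none =>
          by_cases hkt : k = titleOf l
          · subst hkt
            have hh : isHead (titleOf l) l = true := by simp [isHead, h2]
            simp [hh]
          · have hkt' : titleOf l ≠ k := Ne.symm hkt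
            have hh : isHead k l = false := by
              simp [isHead, h2]
              exact hkt'
            have htw : (l :: ls).takeWhile (fun x => !isH2 x) = [] := by
              simp [h2]
            simp [hh, htw, PySem.Dict.getD_insert, hkt']
            exact fun h => absurd h hkt
      · rw [if_neg hc]
        rw [ih _ _ H (fun t ht => by simp at ht)]
        rw [bodyLines]
        cases hB : bodyLines k ls with
        | some b => simp
        | none =>
          have hne : titleOf l ≠ k := fun h => hc ((H _).2 (h ▸ hk))
          have hh : isHead k l = false := by
            simp [isHead, h2]
            exact hne
          have htw : (l :: ls).takeWhile (fun x => !isH2 x) = [] := by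
            simp [h2]
          simp [hh, htw]
    · rw [if_neg h2]
      cases hcur : cur with
      | some c =>
        simp only
        have hck4 : c ∈ keys4 := Hcur c hcur
        have hcc : bufs.contains c = true := (H _).2 hck4
        have H' : ∀ x, (bufs.modify c [] (· ++ [l])).contains x = true ↔ x ∈ keys4 := by
          intro x
          rw [PySem.Dict.modify, PySem.Dict.contains_insert]
          constructor
          · intro hx
            rcases Bool.or_eq_true_iff.1 hx with hx | hx
            · exact (beq_iff_eq.1 hx) ▸ hck4
            · exact (H _).1 hx
          · intro hx; exact Bool.or_eq_true_iff.2 (Or.inr ((H _).2 hx))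
        have Hc' : ∀ t, (some c : Option String) = some t → t ∈ keys4 := by
          intro t ht
          injection ht with h
          rw [← h]
          exact hck4
        rw [ih _ _ H' Hc']
        rw [bodyLines]
        cases hB : bodyLines k ls with
        | some b => simp
        | none =>
          have hh : isHead k l = false := by simp [isHead, h2]
          have htw : (l :: ls).takeWhile (fun x => !isH2 x) = l :: ls.takeWhile (fun x => !isH2 x) := by
            simp [h2]
          by_cases hck : c = k
          · subst hck
            simp [hh, htw, PySem.Dict.modify]
          · have hne : ¬ (some c = some k) := by simp; exact hck
            simp [hh, PySem.Dict.modify, PySem.Dict.getD_insert, hck]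
            exact fun h => absurd h.symm hck
      | none =>
        simp only
        rw [ih _ _ H (fun t ht => by simp at ht)]
        rw [bodyLines]
        cases hB : bodyLines k ls with
        | some b => simp
        | none =>
          have hh : isHead k l = false := by simp [isHead, h2]
          simp [hh]

/-- The two per-section bodies agree. -/
lemma body_eq (lines : List String) (k : String) (hk : k ∈ keys4) :
    slice_bodyA lines ((headingsA lines).getD k none)
        (next_h2A lines ((headingsA lines).getD k none)) = bodyB lines k := by
  rw [A_body lines k hk, bodyB,
    sfold k hk lines bufs0B none contains_bufs0 (fun t ht => by simp at ht)]
  cases hB : bodyLines k lines with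
  | some b => rfl
  | none =>
    simp [getD_bufs0]
    decide

lemma lstrip_rstrip (u : List Char) (hu : PySem.Chars.lstrip u = u) :
    PySem.Chars.lstrip (PySem.Chars.rstrip u) = PySem.Chars.rstrip u := by
  rw [PySem.Chars.lstrip] at *
  rw [PySem.Chars.rstrip]
  have hpref : (List.dropWhile PySem.Chars.isspace u.reverse).reverse <+: u := by
    conv_rhs => rw [← u.reverse_reverse]
    exact List.reverse_prefix.2 (List.dropWhile_suffix _)
  cases h : (List.dropWhile PySem.Chars.isspace u.reverse).reverse with
  | nil => simp
  | cons c w =>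
    rw [h] at hpref
    obtain ⟨r, hr⟩ := hpref
    subst hr
    have hc := List.dropWhile_eq_self_iff.1 hu (by simp)
    simp only [List.cons_append, List.getElem_cons_zero] at hc
    simp [hc]

lemma rstrip_rstrip (u : List Char) :
    PySem.Chars.rstrip (PySem.Chars.rstrip u) = PySem.Chars.rstrip u := by
  simp [PySem.Chars.rstrip, List.dropWhile_idempotent]

lemma chars_strip_strip (t : List Char) :
    PySem.Chars.strip (PySem.Chars.strip t) = PySem.Chars.strip t := by
  rw [PySem.Chars.strip, PySem.Chars.strip]
  rw [lstrip_rstrip (PySem.Chars.lstrip t) (List.dropWhile_idempotent _ _), rstrip_rstrip]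

lemma strip_strip (s : String) : PySem.Str.strip (PySem.Str.strip s) = PySem.Str.strip s := by
  rw [PySem.Str.strip, PySem.Str.strip, String.toList_ofList, chars_strip_strip]

def firstIdx (target : String) : List String → Option Nat
  | [] => none
  | l :: ls => if PySem.Str.strip l == target then some 0 else (firstIdx target ls).map (· + 1)

def firstAfter (target : String) : List String → Option (List String)
  | [] => none
  | l :: ls => if PySem.Str.strip l == target then some ls else firstAfter target ls

lemma grab_done (target : String) (ls : List String) (out : List String) :
    ls.foldl (grabStep target) (some out, false) = (some out, false) := by
  induction ls with
  | nil => rfl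
  | cons l ls ih =>
    rw [List.foldl_cons]
    have hstep : grabStep target (some out, false) l = (some out, false) := rfl
    rw [hstep, ih]

lemma grab_collect (target : String) (ls : List String) :
    ∀ (out : List String),
      (ls.foldl (grabStep target) (some out, true)).1 =
        some (out ++ ls.takeWhile (fun l => !PySem.Str.startswith l "### ")) := by
  induction ls with
  | nil => intro out; simp
  | cons l ls ih =>
    intro out
    rw [List.foldl_cons]
    cases h : PySem.Str.startswith l "### " with
    | true =>
      have hstep : grabStep target (some out, true) l = (some out, false) := by
        simp only [grabStep, h]
        rfl
      rw [hstep, grab_done]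
      simp only [List.takeWhile_cons, h, Bool.not_true, Bool.false_eq_true, if_false]
      simp
    | false =>
      have hstep : grabStep target (some out, true) l = (some (out ++ [l]), true) := by
        simp only [grabStep, h]
        rfl
      rw [hstep, ih (out ++ [l])]
      simp only [List.takeWhile_cons, h, Bool.not_false, if_true]
      simp

lemma firstIdx_firstAfter (target : String) (ls : List String) :
    firstAfter target ls = (firstIdx target ls).map (fun i => ls.drop (i + 1)) := by
  induction ls with
  | nil => rfl
  | cons l ls ih =>
    rw [firstAfter, firstIdx]
    cases h : (PySem.Str.strip l == target) with
    | true => simp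
    | false =>
      simp only [Bool.false_eq_true, if_false, ih]
      cases firstIdx target ls <;> simp

lemma find_enumerate (target : String) (ls : List String) :
    ∀ (s : Nat),
      (PySem.List.enumerate ls (Int.ofNat s)).find? (fun p => PySem.Str.strip p.2 == target) =
        (firstIdx target ls).map (fun i => (Int.ofNat (s + i), ls.getD i "")) := by
  induction ls with
  | nil => intro s; simp [PySem.List.enumerate_nil, firstIdx]
  | cons l ls ih =>
    intro s
    rw [PySem.List.enumerate_cons, List.find?_cons, firstIdx]
    cases h : (PySem.Str.strip l == target) with
    | true => simp
    | false =>
      simp only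
      have hcast : (Int.ofNat s) + 1 = Int.ofNat (s + 1) := by simp [Int.ofNat_eq_natCast]
      rw [hcast, ih (s + 1)]
      cases hF : firstIdx target ls with
      | none => simp
      | some i =>
        simp only [Bool.false_eq_true, if_false, Option.map_some, List.getD_cons_succ]
        have harith : s + 1 + i = s + (i + 1) := by omega
        rw [harith]

lemma grab_eq (target : String) (lines : List String) :
    grabB lines target = (firstAfter target lines).map
      (fun rest => PySem.Str.strip (PySem.Str.join "\n"
        (rest.takeWhile (fun l => !PySem.Str.startswith l "### ")))) := by
  induction lines with
  | nil => rfl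
  | cons l ls ih =>
    rw [grabB, List.foldl_cons]
    cases h : (PySem.Str.strip l == target) with
    | true =>
      have hstep : grabStep target (none, false) l = (some [], true) := by
        simp [grabStep, h]
      rw [hstep]
      rcases hf : ls.foldl (grabStep target) (some [], true) with ⟨fst, snd⟩
      have h1 : fst = some ([] ++ ls.takeWhile (fun l => !PySem.Str.startswith l "### ")) := by
        have := grab_collect target ls []
        rw [hf] at this
        exact this
      subst h1
      rw [firstAfter]
      simp [h]
    | false =>
      have hstep : grabStep target (none, false) l = (none, false) := by
        simp [grabStep, h]
      rw [hstep]
      rw [grabB] at ih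
      rw [ih, firstAfter]
      simp [h]

lemma h3A_eq (body : String) (subtitle : String) (hb : PySem.Str.strip body = body)
    (hne : body ≠ "") :
    parse_h3_subsection body subtitle =
      ((firstAfter (PySem.Str.join "" ["### ", subtitle]) (PySem.Str.splitlines body)).map
        (fun rest => PySem.Str.strip (PySem.Str.join "\n"
          (rest.takeWhile (fun l => !PySem.Str.startswith l "### "))))).getD "" := by
  rw [parse_h3_subsection]
  have hguard : (PySem.Str.strip body == "") = false := by
    rw [hb]
    exact beq_eq_false_iff_ne.2 hne
  rw [hguard]
  simp only [Bool.false_eq_true, if_false]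
  rw [show (0 : Int) = Int.ofNat 0 from rfl]
  rw [find_enumerate (PySem.Str.join "" ["### ", subtitle]) (PySem.Str.splitlines body) 0]
  rw [firstIdx_firstAfter]
  cases hF : firstIdx (PySem.Str.join "" ["### ", subtitle]) (PySem.Str.splitlines body) with
  | none => simp
  | some i =>
    simp only [Option.map_some, Option.getD_some]
    have hcast : Int.ofNat (0 + i) + 1 = ((i + 1 : Nat) : Int) := by
      simp [Int.ofNat_eq_natCast]
    rw [hcast, PySem.List.slice_from_natCast]

lemma any_eq_firstAfter (target : String) (ls : List String) :
    (ls.any (fun l => PySem.Str.strip l == target)) = (firstAfter target ls).isSome := by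
  induction ls with
  | nil => rfl
  | cons l ls ih =>
    rw [List.any_cons, firstAfter]
    cases h : (PySem.Str.strip l == target) with
    | true => simp
    | false => simp [ih]

lemma subsection_eq (body : String) (hb : PySem.Str.strip body = body) :
    parse_resolution_subsections body = split_resolutionB body := by
  by_cases hbe : body = ""
  · subst hbe
    decide
  · rw [parse_resolution_subsections, split_resolutionB]
    have htT : PySem.Str.join "" ["### ", "Temporary"] = "### Temporary" := by decide
    have htP : PySem.Str.join "" ["### ", "Permanent"] = "### Permanent" := by decide
    rw [h3A_eq body "Temporary" hb hbe, h3A_eq body "Permanent" hb hbe]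
    rw [grab_eq, grab_eq, any_eq_firstAfter, any_eq_firstAfter, htT, htP]
    have hsb : (PySem.Str.strip body == "") = false := by
      rw [hb]
      exact beq_eq_false_iff_ne.2 hbe
    cases hT : firstAfter "### Temporary" (PySem.Str.splitlines body) with
    | none =>
      cases hP : firstAfter "### Permanent" (PySem.Str.splitlines body) with
      | none => simp [hb, hbe]
      | some p => simp [hsb]
    | some t =>
      cases hP : firstAfter "### Permanent" (PySem.Str.splitlines body) with
      | none => simp
      | some p => simp

-- ===== VERDICT (by name: the statement is the Claim_ definition above) =====
theorem parse_index_md_spec : Claim_equal_parse_index_md := by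
  intro text _
  unfold Spec_parse_index_md
  simp only [parse_index_md, parse_index_md_alt]
  have hk1 : "Summary" ∈ keys4 := by decide
  have hk2 : "Impact & Severity" ∈ keys4 := by decide
  have hk3 : "Root Cause" ∈ keys4 := by decide
  have hk4 : "Resolution" ∈ keys4 := by decide
  rw [body_eq (PySem.Str.splitlines text) "Summary" hk1,
    body_eq (PySem.Str.splitlines text) "Impact & Severity" hk2,
    body_eq (PySem.Str.splitlines text) "Root Cause" hk3,
    body_eq (PySem.Str.splitlines text) "Resolution" hk4]
  have hb : PySem.Str.strip (bodyB (PySem.Str.splitlines text) "Resolution") =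
      bodyB (PySem.Str.splitlines text) "Resolution" := by
    rw [bodyB]
    exact strip_strip _
  rw [subsection_eq _ hb]
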